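-- pv_equiv track=rewrite | github.com/datafathom/AI_Investor | services/execution/algo_execution.py | generate_twap_schedule
-- ===== SOURCE A (Python) =====
-- from typing import Dict, Any, List
--
-- def generate_twap_schedule(
--                          total_quantity: int,
--                          num_batches: int) -> List[int]:
--     """
--     Slice order evenly across time buckets.
--     """
--     if num_batches <= 0:
--         return [total_quantity]
--
--     batch_size = total_quantity // num_batches
--     remainder = total_quantity % num_batches
--
--     schedule = [batch_size] * num_batches
--
--     # Distribute remainder
--     for i in range(remainder):
--         schedule[i] += 1
--
--     return schedule
-- ===== SOURCE B (Python) =====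
-- def generate_twap_schedule(total_quantity: int, num_batches: int):
--     """
--     Slice order evenly across time buckets by greedy ceiling division:
--     each batch takes ceil(remaining / batches_left), so no quotient/remainder
--     pair or post-hoc remainder distribution is ever computed.
--     """
--     if num_batches <= 0:
--         return [total_quantity]
--     schedule = []
--     remaining = total_quantity
--     for k in range(num_batches, 0, -1):
--         b = -(-remaining // k)  # ceiling division
--         schedule.append(b)
--         remaining -= b
--     return schedule
-- ===== Notes on version B (the rewrite author's own statement) =====
-- stated objective: alternative
-- what changed: Replaces the quotient/remainder precomputation plus remainder-distribution index loop with a greedy single-pass state machine: each batch takes ceil(remaining/batches_left) and subtracts it from the running remainder, so no uniform list is built or mutated.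
import Mathlib
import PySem

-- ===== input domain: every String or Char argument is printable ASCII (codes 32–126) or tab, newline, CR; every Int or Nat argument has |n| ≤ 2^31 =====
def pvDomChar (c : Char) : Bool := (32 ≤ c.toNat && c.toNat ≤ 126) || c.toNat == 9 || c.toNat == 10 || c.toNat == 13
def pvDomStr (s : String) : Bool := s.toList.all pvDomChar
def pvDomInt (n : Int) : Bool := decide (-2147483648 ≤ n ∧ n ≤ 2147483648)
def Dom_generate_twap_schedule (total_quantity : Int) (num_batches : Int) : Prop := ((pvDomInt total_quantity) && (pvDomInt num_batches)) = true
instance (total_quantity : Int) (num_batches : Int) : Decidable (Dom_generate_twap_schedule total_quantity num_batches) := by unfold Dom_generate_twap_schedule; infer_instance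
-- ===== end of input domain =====

-- B distributes the quantity by greedy ceiling division (each batch = ceil(remaining/batches_left)) instead of precomputing quotient/remainder and patching the first entries (objective: alternative).


-- ===== PORT A =====
def generate_twap_schedule (total_quantity : Int) (num_batches : Int) : List Int :=
  if num_batches ≤ 0 then [total_quantity]
  else
    let batch_size := PySem.Int.floordiv total_quantity num_batches
    let remainder := PySem.Int.mod total_quantity num_batches
    let schedule := PySem.List.pyRepeat [batch_size] num_batches
    -- for i in range(remainder): schedule[i] += 1
    (PySem.List.pyRange 0 remainder 1).foldl
      (fun s i => PySem.List.pySetD s i (PySem.List.pyGetD s i 0 + 1)) schedule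

-- ===== PORT B =====
def generate_twap_schedule_alt (total_quantity : Int) (num_batches : Int) : List Int :=
  if num_batches ≤ 0 then [total_quantity]
  else
    -- for k in range(num_batches, 0, -1): b = -(-remaining // k); schedule.append(b); remaining -= b
    ((PySem.List.pyRange num_batches 0 (-1)).foldl
      (fun st k =>
        let b := -(PySem.Int.floordiv (-(st.2)) k)
        (st.1 ++ [b], st.2 - b))
      (([] : List Int), total_quantity)).1

-- ===== PRECONDITION & SPEC =====
def Spec_generate_twap_schedule (total_quantity : Int) (num_batches : Int) (out : List Int) : Prop := out = generate_twap_schedule_alt total_quantity num_batches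
instance (total_quantity : Int) (num_batches : Int) (out : List Int) : Decidable (Spec_generate_twap_schedule total_quantity num_batches out) := by unfold Spec_generate_twap_schedule; infer_instance

-- ===== CLAIM =====
def Claim_equal_generate_twap_schedule : Prop := ∀ (total_quantity : Int) (num_batches : Int), Dom_generate_twap_schedule total_quantity num_batches → Spec_generate_twap_schedule total_quantity num_batches (generate_twap_schedule total_quantity num_batches)

-- ===== LEMMAS AND PROOFS =====

-- reading the first element of the second block
theorem pv_getD_mid (bs : Int) (j m : Nat) :
    (List.replicate j (bs + 1) ++ bs :: List.replicate m bs).getD j 0 = bs := by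
  induction j with
  | zero => simp
  | succ j ih => simp

-- setting the first element of the second block moves it into the first block
theorem pv_set_mid (bs : Int) (j m : Nat) :
    (List.replicate j (bs + 1) ++ bs :: List.replicate m bs).set j (bs + 1)
      = List.replicate (j + 1) (bs + 1) ++ List.replicate m bs := by
  induction j with
  | zero => simp [List.replicate_succ]
  | succ j ih =>
      simp only [List.replicate_succ, List.cons_append, List.set_cons_succ, ih]

-- A's remainder loop turns the first r entries into bs+1
theorem pv_loop (bs : Int) (n r : Nat) (hr : r ≤ n) :
    ∀ (k j : Nat), j + k = r →
      (PySem.List.pyRange (j : Int) (r : Int) 1).foldl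
        (fun s i => PySem.List.pySetD s i (PySem.List.pyGetD s i 0 + 1))
        (List.replicate j (bs + 1) ++ List.replicate (n - j) bs)
      = List.replicate r (bs + 1) ++ List.replicate (n - r) bs := by
  intro k
  induction k with
  | zero =>
      intro j hj
      have : j = r := by omega
      subst this
      rw [PySem.List.pyRange_one_eq_nil (le_refl _)]
      simp
  | succ k ih =>
      intro j hj
      have hjr : (j : Int) < (r : Int) := by exact_mod_cast (by omega : j < r)
      rw [PySem.List.pyRange_one_cons hjr]
      have hnj : n - j = (n - (j + 1)) + 1 := by omega
      rw [List.foldl_cons]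
      have hstep :
          PySem.List.pySetD (List.replicate j (bs + 1) ++ List.replicate (n - j) bs) (j : Int)
            (PySem.List.pyGetD (List.replicate j (bs + 1) ++ List.replicate (n - j) bs) (j : Int) 0 + 1)
          = List.replicate (j + 1) (bs + 1) ++ List.replicate (n - (j + 1)) bs := by
        rw [hnj, List.replicate_succ]
        rw [PySem.List.pyGetD_natCast, PySem.List.pySetD_natCast]
        rw [pv_getD_mid, pv_set_mid]
      rw [hstep]
      have hcast : (j : Int) + 1 = ((j + 1 : Nat) : Int) := by push_cast; ring
      rw [hcast]
      exact ih (j + 1) (by omega)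

-- B's greedy ceiling peel produces the two blocks: with k batches left and
-- remaining = q*k + s (0 ≤ s < k, or s = k = 0), the peel appends
-- s copies of q+1 followed by k−s copies of q.
theorem pv_peel (q : Int) :
    ∀ (k s : Nat) (acc : List Int), (s < k ∨ (s = 0 ∧ k = 0)) →
      ((PySem.List.pyRange (k : Int) 0 (-1)).foldl
        (fun st i =>
          let b := -(PySem.Int.floordiv (-(st.2)) i)
          (st.1 ++ [b], st.2 - b))
        (acc, q * k + s)).1
      = acc ++ List.replicate s (q + 1) ++ List.replicate (k - s) q := by
  intro k
  induction k with
  | zero =>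
      intro s acc hs
      have : s = 0 := by omega
      subst this
      rw [PySem.List.pyRange_neg_one_eq_nil (by norm_num)]
      simp
  | succ k ih =>
      intro s acc hs
      have hsk : s < k + 1 := by omega
      have hkpos : (0 : Int) < ((k : Int) + 1) := by positivity
      rw [show ((k + 1 : Nat) : Int) = (k : Int) + 1 by push_cast; ring]
      rw [PySem.List.pyRange_neg_one_cons (by omega : (0:Int) < (k : Int) + 1)]
      rw [List.foldl_cons]
      by_cases h0 : s = 0
      · subst h0
        simp only [Nat.cast_zero, add_zero, Nat.sub_zero, List.replicate_zero,
          List.append_nil]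
        have hb : -(PySem.Int.floordiv (-(q * ((k:Int) + 1))) ((k:Int) + 1)) = q := by
          rw [PySem.Int.neg_floordiv_neg_eq_iff_of_pos hkpos]
          constructor <;> nlinarith
        rw [hb]
        have harg : q * ((k:Int)+1) - q = q * (k:Int) + ((0:Nat):Int) := by norm_num; ring
        rw [show ((k:Int)+1) - 1 = (k:Int) by ring, harg,
          ih 0 (acc ++ [q]) (by omega)]
        simp [List.replicate_succ]
      · have hspos : 0 < s := by omega
        have hb : -(PySem.Int.floordiv (-(q * ((k:Int) + 1) + s)) ((k:Int) + 1)) = q + 1 := by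
          rw [PySem.Int.neg_floordiv_neg_eq_iff_of_pos hkpos]
          have h1 : (0:Int) < (s:Int) := by exact_mod_cast hspos
          have h2 : (s:Int) ≤ (k:Int) + 1 := by exact_mod_cast Nat.le_of_lt_succ (by omega)
          constructor <;> nlinarith
        simp only [hb]
        have harg : q * ((k:Int)+1) + s - (q+1) = q * (k:Int) + ((s - 1 : Nat) : Int) := by
          have : ((s - 1 : Nat) : Int) = (s : Int) - 1 := by omega
          rw [this]; ring
        rw [show ((k:Int)+1) - 1 = (k:Int) by ring]
        rw [harg]
        have hrest : k - (s - 1) = (k + 1) - s := by omega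
        have hrep : (q + 1) :: List.replicate (s - 1) (q + 1) = List.replicate s (q + 1) := by
          rw [← List.replicate_succ]; congr 1; omega
        have hih := ih (s - 1) (acc ++ [q + 1]) (by omega)
        rw [hrest] at hih
        rw [hih, ← hrep]
        simp

-- ===== VERDICT =====
theorem generate_twap_schedule_spec : Claim_equal_generate_twap_schedule := by
  unfold Claim_equal_generate_twap_schedule Spec_generate_twap_schedule
  intro tq nb _
  unfold generate_twap_schedule generate_twap_schedule_alt
  by_cases h : nb ≤ 0
  · simp [h]
  · simp only [if_neg h]
    have hnb : 0 < nb := by omega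
    set bs := PySem.Int.floordiv tq nb with hbs
    have hm0 : 0 ≤ PySem.Int.mod tq nb := PySem.Int.mod_nonneg tq hnb
    have hml : PySem.Int.mod tq nb < nb := PySem.Int.mod_lt tq hnb
    set r := PySem.Int.mod tq nb with hr
    have hrn : (r.toNat : Int) = r := Int.toNat_of_nonneg hm0
    have hnn : (nb.toNat : Int) = nb := Int.toNat_of_nonneg (le_of_lt hnb)
    -- A side: replicate-blocks form
    have hrepA : PySem.List.pyRepeat [bs] nb = List.replicate nb.toNat bs :=
      PySem.List.pyRepeat_singleton bs nb
    have hle : r.toNat ≤ nb.toNat := by omega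
    have hA := pv_loop bs nb.toNat r.toNat hle r.toNat 0 (by omega)
    simp only [Nat.cast_zero, Nat.sub_zero, List.replicate_zero, List.nil_append] at hA
    rw [hrepA, ← hrn, hA]
    -- B side: greedy peel gives the same blocks
    have htq : tq = bs * nb + r := by
      rw [hbs, hr]; have := PySem.Int.floordiv_mul_add_mod tq nb; linarith
    have hB := pv_peel bs nb.toNat r.toNat ([]) (by omega)
    rw [hnn, hrn] at hB
    rw [show bs * nb + r = tq from htq.symm] at hB
    rw [hB]
    simp
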